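-- pv_equiv track=rewrite | github.com/zZD4rkN1gh7Xx/Y3-S2-AI-24-25 | ai_logic.py | advanced_heuristic
-- ===== SOURCE A (Python) =====
-- def advanced_heuristic(board):
--     moves_needed = 0
--     color_positions = {}
--
--     for branch_index, branch in enumerate(board):
--         for bird in branch:
--             if bird not in color_positions:
--                 color_positions[bird] = []
--             color_positions[bird].append(branch_index)
--
--     for color, positions in color_positions.items():
--         unique_branches = set(positions)
--         moves_needed += len(unique_branches) - 1
--
--     empty_branches = sum(1 for branch in board if not branch)
--
--     if empty_branches == 0:
--         moves_needed += 3
--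
--     return moves_needed
-- ===== SOURCE B (Python) =====
-- def advanced_heuristic(board):
--     pairs = set()
--     colors = set()
--     for branch_index, branch in enumerate(board):
--         for bird in branch:
--             pairs.add((bird, branch_index))
--             colors.add(bird)
--     moves = len(pairs) - len(colors)
--     if all(board):
--         moves += 3
--     return moves
-- ===== Notes on version B (the rewrite author's own statement) =====
-- stated objective: simpler
-- what changed: Replaces the grouping dictionary and the per-color counting loop by one pass collecting distinct (bird, branch) pairs and distinct colors, using the identity sum_color(|branches_of_color|-1) = |distinct pairs| - |colors|, with all(board) for the empty-branch check.
import Mathlib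
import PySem

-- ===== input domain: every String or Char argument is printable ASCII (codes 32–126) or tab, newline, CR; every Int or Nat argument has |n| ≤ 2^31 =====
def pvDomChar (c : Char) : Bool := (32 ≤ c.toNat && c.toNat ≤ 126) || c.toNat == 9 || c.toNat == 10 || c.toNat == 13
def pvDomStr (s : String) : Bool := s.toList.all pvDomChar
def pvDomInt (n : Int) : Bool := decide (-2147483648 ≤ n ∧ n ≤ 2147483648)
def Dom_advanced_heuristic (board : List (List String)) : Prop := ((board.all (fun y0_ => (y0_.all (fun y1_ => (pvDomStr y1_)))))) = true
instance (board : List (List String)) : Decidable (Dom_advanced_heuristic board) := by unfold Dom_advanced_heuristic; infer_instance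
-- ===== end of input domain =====

-- B replaces A's grouping dictionary and per-color counting loop by one pass collecting
-- distinct (bird, branch) pairs and distinct colors (simpler decomposition; same cost).

-- ===== PORT A =====
def advanced_heuristic (board : List (List String)) : Int :=
  let color_positions : PySem.Dict String (List Int) :=
    (PySem.List.enumerate board).foldl
      (fun d p => p.2.foldl
        (fun d bird =>
          (if d.contains bird then d else d.insert bird []).modify bird []
            (fun ps => ps ++ [p.1]))
        d)
      PySem.Dict.empty
  let moves_needed : Int :=
    color_positions.items.foldl
      (fun m it => m + (((PySem.Set.ofList it.2).length : Int) - 1)) 0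
  let empty_branches : Int :=
    board.foldl (fun n branch => if branch = [] then n + 1 else n) 0
  if empty_branches = 0 then moves_needed + 3 else moves_needed

-- ===== PORT B =====
def advanced_heuristic_alt (board : List (List String)) : Int :=
  let sets : PySem.Set (String × Int) × PySem.Set String :=
    (PySem.List.enumerate board).foldl
      (fun st p => p.2.foldl
        (fun (st : PySem.Set (String × Int) × PySem.Set String) bird =>
          (st.1.add (bird, p.1), st.2.add bird)) st)
      (PySem.Set.empty, PySem.Set.empty)
  let moves : Int := (sets.1.length : Int) - (sets.2.length : Int)
  if board.all (fun branch => !branch.isEmpty) then moves + 3 else moves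

-- ===== PRECONDITION & SPEC =====
def Spec_advanced_heuristic (board : List (List String)) (out : Int) : Prop := out = advanced_heuristic_alt board
instance (board : List (List String)) (out : Int) : Decidable (Spec_advanced_heuristic board out) := by unfold Spec_advanced_heuristic; infer_instance

-- ===== CLAIM (what is proved, stated in full; the proofs are below) =====
def Claim_equal_advanced_heuristic : Prop := ∀ (board : List (List String)), Dom_advanced_heuristic board → Spec_advanced_heuristic board (advanced_heuristic board)

-- ===== LEMMAS AND PROOFS =====

-- the flat list of (bird, branch_index) pairs both nested loops traverse
def pvFlat (board : List (List String)) : List (String × Int) :=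
  (PySem.List.enumerate board).flatMap (fun p => p.2.map (fun b => (b, p.1)))

-- a nested loop over enumerate is a flat loop over the (bird, index) pairs
theorem pv_foldl_flat {σ : Type} (s : σ → (String × Int) → σ) :
    ∀ (l : List (Int × List String)) (init : σ),
      l.foldl (fun d p => p.2.foldl (fun d bird => s d (bird, p.1)) d) init
        = (l.flatMap (fun p => p.2.map (fun b => (b, p.1)))).foldl s init := by
  intro l
  induction l with
  | nil => intro init; rfl
  | cons h t ih =>
    intro init
    simp only [List.foldl_cons, List.flatMap_cons, List.foldl_append, List.foldl_map]
    exact ih _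

-- A's guarded insert-then-append step is a plain modify
theorem pv_stepA_eq (d : PySem.Dict String (List Int)) (b : String) (i : Int) :
    (if d.contains b then d else d.insert b []).modify b [] (fun ps => ps ++ [i])
      = d.modify b [] (fun ps => ps ++ [i]) := by
  by_cases h : d.contains b = true
  · rw [if_pos h]
  · rw [if_neg h]
    have h' : d.items.any (fun p => p.1 == b) = false := Bool.eq_false_iff.mpr h
    have hfind : d.items.find? (fun p => p.1 == b) = none :=
      List.find?_eq_none.mpr (fun x hx => by simpa using List.any_eq_false.mp h' x hx)
    have h1 : (d.insert b []).getD b [] = [] := by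
      simp [PySem.Dict.getD, PySem.Dict.get?_insert_self]
    have h2 : d.getD b [] = [] := by
      simp [PySem.Dict.getD, PySem.Dict.get?, hfind]
    simp only [PySem.Dict.modify, h1, h2, PySem.Dict.insert_insert_self]

-- A's nested dict-building loop, flattened
theorem pv_flatA (board : List (List String)) :
    ((PySem.List.enumerate board).foldl
      (fun d p => p.2.foldl
        (fun d bird =>
          (if d.contains bird then d else d.insert bird []).modify bird []
            (fun ps => ps ++ [p.1]))
        d)
      PySem.Dict.empty)
    = (pvFlat board).foldl (fun d q => d.modify q.1 [] (fun ps => ps ++ [q.2]))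
        PySem.Dict.empty := by
  have h := pv_foldl_flat
      (fun (d : PySem.Dict String (List Int)) (q : String × Int) =>
        (if d.contains q.1 then d else d.insert q.1 []).modify q.1 [] (fun ps => ps ++ [q.2]))
      (PySem.List.enumerate board) PySem.Dict.empty
  have hfun : (fun (d : PySem.Dict String (List Int)) (q : String × Int) =>
        (if d.contains q.1 then d else d.insert q.1 []).modify q.1 [] (fun ps => ps ++ [q.2]))
      = fun d q => d.modify q.1 [] (fun ps => ps ++ [q.2]) := by
    funext d q; exact pv_stepA_eq d q.1 q.2
  refine h.trans ?_
  unfold pvFlat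
  rw [hfun]

-- B's nested set-building loop, flattened and split
theorem pv_flatB (board : List (List String)) :
    ((PySem.List.enumerate board).foldl
      (fun st p => p.2.foldl
        (fun (st : PySem.Set (String × Int) × PySem.Set String) bird =>
          (st.1.add (bird, p.1), st.2.add bird)) st)
      (PySem.Set.empty, PySem.Set.empty))
    = (PySem.Set.ofList (pvFlat board), PySem.Set.ofList ((pvFlat board).map Prod.fst)) := by
  have h := pv_foldl_flat
      (fun (st : PySem.Set (String × Int) × PySem.Set String) (q : String × Int) =>
        (st.1.add q, st.2.add q.1))
      (PySem.List.enumerate board) (PySem.Set.empty, PySem.Set.empty)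
  refine h.trans ?_
  unfold pvFlat
  have h2 := PySem.List.foldl_prod_mk
      (fun (s : PySem.Set (String × Int)) (e : String × Int) => PySem.Set.add s e)
      (fun (s : PySem.Set String) (e : String × Int) => PySem.Set.add s e.1)
      ((PySem.List.enumerate board).flatMap (fun p => p.2.map (fun b => (b, p.1))))
      PySem.Set.empty PySem.Set.empty
  refine Eq.trans h2 ?_
  have e1 : ((PySem.List.enumerate board).flatMap (fun p => p.2.map (fun b => (b, p.1)))).foldl
      (fun (s : PySem.Set (String × Int)) (e : String × Int) => PySem.Set.add s e) PySem.Set.empty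
      = PySem.Set.ofList ((PySem.List.enumerate board).flatMap (fun p => p.2.map (fun b => (b, p.1)))) := by
    rw [PySem.Set.ofList_eq_foldl]; rfl
  have e2 : ((PySem.List.enumerate board).flatMap (fun p => p.2.map (fun b => (b, p.1)))).foldl
      (fun (s : PySem.Set String) (e : String × Int) => PySem.Set.add s e.1) PySem.Set.empty
      = PySem.Set.ofList (((PySem.List.enumerate board).flatMap (fun p => p.2.map (fun b => (b, p.1)))).map Prod.fst) := by
    rw [PySem.Set.ofList_eq_foldl, List.foldl_map]; rfl
  rw [e1, e2]

-- first-occurrence dedup has the toFinset cardinality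
theorem pv_ofList_length {α : Type} [BEq α] [LawfulBEq α] [DecidableEq α] (l : List α) :
    (PySem.Set.ofList l).length = l.toFinset.card := by
  have hnd := PySem.Set.nodup_ofList l
  have h : (PySem.Set.ofList l).toFinset = l.toFinset := by
    ext a; simp [List.mem_toFinset, PySem.Set.mem_ofList]
  rw [← List.toFinset_card_of_nodup hnd, h]

theorem pv_toFinset_map {α β : Type} [DecidableEq α] [DecidableEq β] (l : List α) (f : α → β) :
    (l.map f).toFinset = l.toFinset.image f := by
  ext b; simp

-- Σ over distinct colors of (distinct branches of that color) = distinct (bird, branch) pairs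
theorem pv_fiber_sum (P : List (String × Int)) :
    ((PySem.Set.ofList (P.map Prod.fst)).map
        (fun c => (PySem.Set.ofList ((P.filter (fun q => q.1 == c)).map Prod.snd)).length)).sum
      = (PySem.Set.ofList P).length := by
  have hterm : ∀ c : String,
      (PySem.Set.ofList ((P.filter (fun q => q.1 == c)).map Prod.snd)).length
        = (P.toFinset.filter (fun q => q.1 = c)).card := by
    intro c
    have hinj : Set.InjOn Prod.snd (((P.filter (fun q => q.1 == c)).toFinset : Finset (String × Int)) : Set (String × Int)) := by
      intro x hx y hy hxy
      have hx' : x.1 = c := by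
        have hm := List.mem_toFinset.mp (Finset.mem_coe.mp hx)
        have := List.of_mem_filter hm
        simpa using this
      have hy' : y.1 = c := by
        have hm := List.mem_toFinset.mp (Finset.mem_coe.mp hy)
        have := List.of_mem_filter hm
        simpa using this
      exact Prod.ext (hx'.trans hy'.symm) hxy
    rw [pv_ofList_length, pv_toFinset_map, Finset.card_image_of_injOn hinj,
      List.toFinset_filter]
    congr 1
    apply Finset.filter_congr
    intro q _
    simp
  have hC : (PySem.Set.ofList (P.map Prod.fst)).toFinset = (P.map Prod.fst).toFinset := by
    ext a; simp [PySem.Set.mem_ofList]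
  have hmaps : Set.MapsTo Prod.fst ((P.toFinset : Finset (String × Int)) : Set (String × Int))
      (((P.map Prod.fst).toFinset : Finset String) : Set String) := by
    intro a ha
    have h1 : a ∈ P := List.mem_toFinset.mp (Finset.mem_coe.mp ha)
    exact Finset.mem_coe.mpr (List.mem_toFinset.mpr (List.mem_map.mpr ⟨a, h1, rfl⟩))
  have hcard := Finset.card_eq_sum_card_fiberwise hmaps
  simp only [hterm]
  rw [← List.sum_toFinset _ (PySem.Set.nodup_ofList (P.map Prod.fst)), hC,
    pv_ofList_length, hcard]

-- fold the "-1 per color" into the sum (Int version)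
theorem pv_sum_sub_one {α : Type} (C : List α) (g : α → Nat) :
    (C.map (fun c => ((g c : Int) - 1))).sum = ((C.map g).sum : Int) - C.length := by
  induction C with
  | nil => simp
  | cons h t ih =>
    simp only [List.map_cons, List.sum_cons, List.length_cons, ih]
    push_cast
    ring

theorem pv_sum_deficit (P : List (String × Int)) :
    ((PySem.Set.ofList (P.map Prod.fst)).map
        (fun c => (((PySem.Set.ofList ((P.filter (fun q => q.1 == c)).map Prod.snd)).length : Int) - 1))).sum
      = ((PySem.Set.ofList P).length : Int) - ((PySem.Set.ofList (P.map Prod.fst)).length : Int) := by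
  calc ((PySem.Set.ofList (P.map Prod.fst)).map
        (fun c => (((PySem.Set.ofList ((P.filter (fun q => q.1 == c)).map Prod.snd)).length : Int) - 1))).sum
      = (((PySem.Set.ofList (P.map Prod.fst)).map
          (fun c => (PySem.Set.ofList ((P.filter (fun q => q.1 == c)).map Prod.snd)).length)).sum : Int)
        - (PySem.Set.ofList (P.map Prod.fst)).length := pv_sum_sub_one _ _
    _ = _ := by rw [pv_fiber_sum]

-- A's items-sum over the flat dict loop equals |distinct pairs| - |distinct colors|
theorem pv_A_sum (P : List (String × Int)) :
    ((P.foldl (fun d q => d.modify q.1 [] (fun ps => ps ++ [q.2]))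
        (PySem.Dict.empty : PySem.Dict String (List Int))).items.foldl
      (fun m it => m + (((PySem.Set.ofList it.2).length : Int) - 1)) 0)
      = ((PySem.Set.ofList P).length : Int)
        - ((PySem.Set.ofList (P.map Prod.fst)).length : Int) := by
  set d := P.foldl (fun d q => d.modify q.1 [] (fun ps => ps ++ [q.2]))
      (PySem.Dict.empty : PySem.Dict String (List Int)) with hd
  have hkeys : d.keys = PySem.Set.ofList (P.map Prod.fst) := by
    rw [hd]
    refine Eq.trans (PySem.Dict.keys_foldl_modify_key P Prod.fst []
      (fun _ q => (fun ps => ps ++ [q.2])) PySem.Dict.empty) ?_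
    show PySem.Set.update ([] : PySem.Set String) (P.map Prod.fst) = _
    rw [PySem.Set.ofList_eq_foldl]
    rfl
  have hnodup : d.keys.Nodup := by
    rw [hd]
    exact PySem.Dict.nodup_keys_foldl_modify_key P Prod.fst []
      (fun _ q => (fun ps => ps ++ [q.2])) PySem.Dict.empty
      (by simp [PySem.Dict.empty, PySem.Dict.keys])
  have hgetD : ∀ c, d.getD c [] = (P.filter (fun q => q.1 == c)).map Prod.snd := by
    intro c
    rw [hd]
    have h := PySem.Dict.getD_foldl_modify_append P
      (PySem.Dict.empty : PySem.Dict String (List Int)) c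
    have hemp : (PySem.Dict.empty : PySem.Dict String (List Int)).getD c [] = [] := rfl
    rw [hemp, List.nil_append] at h
    exact h
  have hitems : d.items = d.keys.map (fun k => (k, d.getD k [])) :=
    PySem.Dict.items_eq_map_keys d hnodup []
  rw [PySem.List.foldl_add d.items
      (fun (it : String × List Int) => (((PySem.Set.ofList it.2).length : Int) - 1)) 0,
    hitems, List.map_map, zero_add, hkeys]
  have hfun : List.map ((fun (it : String × List Int) => (((PySem.Set.ofList it.2).length : Int) - 1)) ∘
        (fun k => (k, d.getD k []))) (PySem.Set.ofList (P.map Prod.fst))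
      = List.map (fun c => (((PySem.Set.ofList ((P.filter (fun q => q.1 == c)).map Prod.snd)).length : Int) - 1))
          (PySem.Set.ofList (P.map Prod.fst)) := by
    apply List.map_congr_left
    intro c _
    simp only [Function.comp_apply, hgetD]
  rw [hfun, pv_sum_deficit]

-- A's empty-branch counter, with the initial value generalized
theorem pv_count_aux : ∀ (board : List (List String)) (init : Int),
    board.foldl (fun (n : Int) branch => if branch = [] then n + 1 else n) init
      = init + (board.countP (fun branch => branch.isEmpty) : Int)
  | [], init => by simp
  | h :: t, init => by
    by_cases hh : h = []
    · have hemp : h.isEmpty = true := by simp [hh]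
      rw [List.foldl_cons, if_pos hh, pv_count_aux t (init + 1), List.countP_cons, hemp,
        if_pos rfl]
      push_cast
      ring
    · have hne : h.isEmpty = false := by simpa [List.isEmpty_iff] using hh
      rw [List.foldl_cons, if_neg hh, pv_count_aux t init, List.countP_cons, hne,
        if_neg Bool.false_ne_true]
      push_cast
      ring

-- A's counter is zero iff all branches are nonempty
theorem pv_empty_count (board : List (List String)) :
    (board.foldl (fun (n : Int) branch => if branch = [] then n + 1 else n) 0 = 0)
      ↔ board.all (fun branch => !branch.isEmpty) = true := by
  rw [pv_count_aux board 0, zero_add, Nat.cast_eq_zero, List.countP_eq_zero]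
  simp [List.all_eq_true]

-- ===== VERDICT (by name: the statement is the Claim_ definition above) =====
theorem advanced_heuristic_spec : Claim_equal_advanced_heuristic := by
  intro board _
  unfold Spec_advanced_heuristic
  simp only [advanced_heuristic, advanced_heuristic_alt, pv_flatA, pv_flatB]
  have hc := pv_empty_count board
  by_cases h : board.all (fun branch => !branch.isEmpty) = true
  · rw [if_pos (hc.mpr h), if_pos h, pv_A_sum]
  · rw [if_neg (fun hh => h (hc.mp hh)), if_neg h, pv_A_sum]
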